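-- pv_equiv track=rewrite | github.com/arcasilesgroup/ai-engineering | tests/unit/test_changelog_breaking_keywords.py | _extract_most_recent_breaking_block
-- ===== SOURCE A (Python) =====
-- def _extract_most_recent_breaking_block(changelog_text: str) -> str:
--     """Return the body of the most recent ``### BREAKING`` block.
--
--     We scan from the top of the file for the first ``### BREAKING`` heading
--     and stop at the next top-level ``## `` heading or the next ``### ``
--     heading at the same level. Anything between those bounds is the body.
--
--     Raises:
--         AssertionError if no BREAKING block is found.
--     """
--     lines = changelog_text.splitlines()
--
--     start = None
--     for idx, line in enumerate(lines):
--         if line.strip().lower().startswith("### breaking"):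
--             start = idx + 1
--             break
--
--     if start is None:
--         msg = "CHANGELOG.md must contain a `### BREAKING` section after spec-101."
--         raise AssertionError(msg)
--
--     end = len(lines)
--     for idx in range(start, len(lines)):
--         line = lines[idx]
--         # Stop at next top-level version heading or next sibling section.
--         if line.startswith("## "):
--             end = idx
--             break
--         if line.startswith("### ") and idx != start - 1:
--             end = idx
--             break
--
--     return "\n".join(lines[start:end])
-- ===== SOURCE B (Python) =====
-- def _extract_most_recent_breaking_block(changelog_text: str) -> str:
--     """Single pass: flip a `collecting` flag at the first BREAKING heading,
--     gather body lines until the next heading."""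
--     collecting = False
--     body = []
--     for line in changelog_text.splitlines():
--         if collecting:
--             if line.startswith("## ") or line.startswith("### "):
--                 break
--             body.append(line)
--         elif line.strip().lower().startswith("### breaking"):
--             collecting = True
--     if not collecting:
--         msg = "CHANGELOG.md must contain a `### BREAKING` section after spec-101."
--         raise AssertionError(msg)
--     return "\n".join(body)
-- ===== Notes on version B (the rewrite author's own statement) =====
-- stated objective: simpler
-- what changed: Replaced A's two index-based scans (find the heading index, then scan indices for the block end and slice lines[start:end]) by a single pass over the lines with a collecting flag and an accumulator; no indices or slicing.
import Mathlib
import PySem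

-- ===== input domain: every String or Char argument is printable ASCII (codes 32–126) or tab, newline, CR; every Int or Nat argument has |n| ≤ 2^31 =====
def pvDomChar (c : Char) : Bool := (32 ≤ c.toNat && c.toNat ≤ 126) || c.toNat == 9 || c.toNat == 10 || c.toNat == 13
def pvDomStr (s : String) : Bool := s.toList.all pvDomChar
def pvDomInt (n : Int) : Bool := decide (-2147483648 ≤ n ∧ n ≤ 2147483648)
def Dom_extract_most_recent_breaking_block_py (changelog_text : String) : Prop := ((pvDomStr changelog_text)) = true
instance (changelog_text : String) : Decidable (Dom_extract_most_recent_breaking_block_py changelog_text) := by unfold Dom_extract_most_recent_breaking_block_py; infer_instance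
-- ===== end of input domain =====

-- B replaces A's two scans (find the heading by index, then scan indices for the block end
-- and slice) by a single pass with a collecting flag and an accumulator (objective: simpler).
-- Where A raises AssertionError (no BREAKING heading) the ports return "" (excluded by Pre_).

-- ===== PORT A =====
-- first loop: enumerate lines, break at first BREAKING heading with start = idx + 1
def pvA_findStart : List String → Nat → Option Nat
  | [], _ => none
  | l :: ls, idx =>
    if PySem.Str.startswith (PySem.Str.lower (PySem.Str.strip l)) "### breaking"
    then some (idx + 1) else pvA_findStart ls (idx + 1)

-- second loop: for idx in range(start, len(lines)) reading lines[idx] — recursion over the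
-- suffix carrying the absolute index idx; returns the break index (none = no break)
def pvA_findEnd : List String → Nat → Nat → Option Nat
  | [], _, _ => none
  | l :: ls, idx, start =>
    if PySem.Str.startswith l "## " then some idx
    else if PySem.Str.startswith l "### " && decide (idx ≠ start - 1) then some idx
    else pvA_findEnd ls (idx + 1) start

def extract_most_recent_breaking_block_py (changelog_text : String) : String :=
  match pvA_findStart (PySem.Str.splitlines changelog_text) 0 with
  | none => ""   -- Python raises AssertionError here; excluded by Pre_
  | some start =>
    PySem.Str.join "\n"
      (PySem.List.slice (PySem.Str.splitlines changelog_text) (some (start : Int))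
        (some (((pvA_findEnd ((PySem.Str.splitlines changelog_text).drop start) start start).getD
          (PySem.Str.splitlines changelog_text).length : Nat) : Int)))

-- ===== PORT B =====
-- single pass: state (collecting, body); break encoded by returning the state
def pvB_loop : List String → Bool → List String → Bool × List String
  | [], c, acc => (c, acc)
  | l :: ls, c, acc =>
    if c then
      if PySem.Str.startswith l "## " || PySem.Str.startswith l "### " then (c, acc)
      else pvB_loop ls c (acc ++ [l])
    else if PySem.Str.startswith (PySem.Str.lower (PySem.Str.strip l)) "### breaking"
    then pvB_loop ls true acc
    else pvB_loop ls false acc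

def extract_most_recent_breaking_block_py_alt (changelog_text : String) : String :=
  match pvB_loop (PySem.Str.splitlines changelog_text) false [] with
  | (collecting, body) =>
    if collecting then PySem.Str.join "\n" body else ""   -- Python raises AssertionError when collecting = false

-- ===== PRECONDITION & SPEC =====
-- Pre_ excludes exactly the inputs without a BREAKING heading, on which A raises AssertionError.
def Pre_extract_most_recent_breaking_block_py (changelog_text : String) : Prop :=
  ∃ l ∈ PySem.Str.splitlines changelog_text,
    PySem.Str.startswith (PySem.Str.lower (PySem.Str.strip l)) "### breaking" = true
instance (changelog_text : String) : Decidable (Pre_extract_most_recent_breaking_block_py changelog_text) := by unfold Pre_extract_most_recent_breaking_block_py; infer_instance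

def pvWitness_extract_most_recent_breaking_block_py : String := "### BREAKING\nbody line\n## 1.0"

def Spec_extract_most_recent_breaking_block_py (changelog_text : String) (out : String) : Prop := out = extract_most_recent_breaking_block_py_alt changelog_text
instance (changelog_text : String) (out : String) : Decidable (Spec_extract_most_recent_breaking_block_py changelog_text out) := by unfold Spec_extract_most_recent_breaking_block_py; infer_instance

-- ===== CLAIM (what is proved, stated in full; the proofs are below) =====
def Claim_equal_extract_most_recent_breaking_block_py : Prop := ∀ (changelog_text : String), Dom_extract_most_recent_breaking_block_py changelog_text → Pre_extract_most_recent_breaking_block_py changelog_text → Spec_extract_most_recent_breaking_block_py changelog_text (extract_most_recent_breaking_block_py changelog_text)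

-- ===== LEMMAS AND PROOFS =====

-- the two line predicates, for the proofs only
def pvP (l : String) : Bool := PySem.Str.startswith (PySem.Str.lower (PySem.Str.strip l)) "### breaking"
def pvStop (l : String) : Bool := PySem.Str.startswith l "## " || PySem.Str.startswith l "### "

theorem pvB_loop_true (ls : List String) (acc : List String) :
    pvB_loop ls true acc = (true, acc ++ ls.takeWhile (fun l => !pvStop l)) := by
  induction ls generalizing acc with
  | nil => simp [pvB_loop]
  | cons l ls ih =>
    by_cases h : pvStop l = true
    · simp [pvStop] at h
      rcases h with h | h <;> simp [pvB_loop, pvStop, h]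
    · simp [pvStop] at h
      simp [pvB_loop, pvStop, h.1, h.2, ih]

theorem pvB_loop_false (ls : List String) :
    pvB_loop ls false [] =
      (match ls.dropWhile (fun l => !pvP l) with
       | [] => (false, ([] : List String))
       | _ :: rest => (true, rest.takeWhile (fun l => !pvStop l))) := by
  induction ls with
  | nil => simp [pvB_loop]
  | cons l ls ih =>
    by_cases h : pvP l = true <;> simp [pvP] at h <;>
      simp [pvB_loop, pvP, h, pvB_loop_true, ih]

theorem pvA_findStart_eq (ls : List String) (idx : Nat) :
    pvA_findStart ls idx =
      (match ls.dropWhile (fun l => !pvP l) with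
       | [] => none
       | _ :: _ => some (idx + (ls.takeWhile (fun l => !pvP l)).length + 1)) := by
  induction ls generalizing idx with
  | nil => simp [pvA_findStart]
  | cons l ls ih =>
    have hc : PySem.Str.startswith (PySem.Str.lower (PySem.Str.strip l)) "### breaking" = pvP l :=
      rfl
    by_cases h : pvP l = true
    · simp only [pvA_findStart, hc, h, if_true, List.dropWhile_cons,
        List.takeWhile_cons, Bool.not_true, Bool.false_eq_true, if_false, List.length_nil,
        Nat.add_zero]
    · have h' : pvP l = false := Bool.eq_false_iff.mpr h
      simp only [pvA_findStart, hc, h', Bool.false_eq_true, if_false, List.dropWhile_cons,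
        List.takeWhile_cons, Bool.not_false, if_true, ih (idx + 1),
        List.length_cons]
      cases ls.dropWhile (fun l => !pvP l)
      · rfl
      · simp only [Option.some.injEq]; omega

theorem pvA_findEnd_ge (ls : List String) (idx start e : Nat)
    (h : pvA_findEnd ls idx start = some e) : idx ≤ e := by
  induction ls generalizing idx with
  | nil => simp [pvA_findEnd] at h
  | cons l ls ih =>
    simp only [pvA_findEnd] at h
    split_ifs at h with h1 h2
    · simp at h; omega
    · simp at h; omega
    · have := ih (idx + 1) h; omega

theorem pvA_findEnd_take (ls : List String) (idx start : Nat)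
    (h1 : 1 ≤ start) (h2 : start ≤ idx) :
    ls.take ((pvA_findEnd ls idx start).getD (idx + ls.length) - idx) =
      ls.takeWhile (fun l => !pvStop l) := by
  induction ls generalizing idx with
  | nil => simp
  | cons l ls ih =>
    have hne : decide (idx ≠ start - 1) = true := decide_eq_true (by omega)
    rw [List.takeWhile_cons]
    by_cases ha : PySem.Str.startswith l "## " = true
    · have hs : pvStop l = true := by simp only [pvStop, ha, Bool.true_or]
      simp only [pvA_findEnd, ha, if_true, Option.getD_some, Nat.sub_self,
        List.take_zero, hs, Bool.not_true, Bool.false_eq_true, if_false]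
    · have ha' : PySem.Str.startswith l "## " = false := Bool.eq_false_iff.mpr ha
      by_cases hb : PySem.Str.startswith l "### " = true
      · have hs : pvStop l = true := by simp only [pvStop, hb, Bool.or_true]
        simp only [pvA_findEnd, ha', Bool.false_eq_true, if_false, hb, hne, Bool.and_self,
          if_true, Option.getD_some, Nat.sub_self, List.take_zero, hs, Bool.not_true]
      · have hb' : PySem.Str.startswith l "### " = false := Bool.eq_false_iff.mpr hb
        have hs : pvStop l = false := by simp only [pvStop, ha', hb', Bool.or_self]
        have hge : idx + 1 ≤ (pvA_findEnd ls (idx + 1) start).getD (idx + 1 + ls.length) := by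
          cases he : pvA_findEnd ls (idx + 1) start with
          | none => simp
          | some e => simpa using pvA_findEnd_ge ls (idx + 1) start e he
        have hrec := ih (idx + 1) (by omega)
        simp only [pvA_findEnd, ha', hb', Bool.false_eq_true, if_false, Bool.false_and,
          List.length_cons, hs, Bool.not_false, if_true]
        rw [show idx + (ls.length + 1) = idx + 1 + ls.length by omega]
        rw [show (pvA_findEnd ls (idx + 1) start).getD (idx + 1 + ls.length) - idx
              = ((pvA_findEnd ls (idx + 1) start).getD (idx + 1 + ls.length) - (idx + 1)) + 1
            by omega]
        rw [List.take_succ_cons, hrec]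

theorem pv_main (text : String)
    (hpre : Pre_extract_most_recent_breaking_block_py text) :
    extract_most_recent_breaking_block_py text = extract_most_recent_breaking_block_py_alt text := by
  obtain ⟨l0, hmem, hp0⟩ := hpre
  have hne : (PySem.Str.splitlines text).dropWhile (fun l => !pvP l) ≠ [] := by
    intro hnil
    rw [List.dropWhile_eq_nil_iff] at hnil
    have h1 := hnil l0 hmem
    rw [show pvP l0 = true from hp0] at h1
    simp at h1
  obtain ⟨h0, rest, hdrop⟩ :
      ∃ h0 rest, (PySem.Str.splitlines text).dropWhile (fun l => !pvP l) = h0 :: rest := by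
    cases hd : (PySem.Str.splitlines text).dropWhile (fun l => !pvP l) with
    | nil => exact absurd hd hne
    | cons a b => exact ⟨a, b, rfl⟩
  set T := (PySem.Str.splitlines text).takeWhile (fun l => !pvP l) with hT
  have hsplit : T ++ (h0 :: rest) = PySem.Str.splitlines text := by
    rw [← hdrop, hT]; exact List.takeWhile_append_dropWhile
  have hdropk : (PySem.Str.splitlines text).drop (T.length + 1) = rest := by
    rw [← hsplit]; simp [List.drop_append]
  have hlen : (PySem.Str.splitlines text).length = (T.length + 1) + rest.length := by
    rw [← hsplit]; simp; omega
  unfold extract_most_recent_breaking_block_py extract_most_recent_breaking_block_py_alt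
  rw [pvA_findStart_eq, pvB_loop_false, hdrop]
  simp only [Nat.zero_add, hlen]
  rw [PySem.List.slice_natCast, hdropk]
  rw [pvA_findEnd_take rest _ _ (by omega) (Nat.le_refl _)]
  simp

-- ===== VERDICT (by name: the statement is the Claim_ definition above) =====
theorem extract_most_recent_breaking_block_py_spec : Claim_equal_extract_most_recent_breaking_block_py := by
  intro text _ hpre
  exact pv_main text hpre
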